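-- pv_equiv track=rewrite | github.com/techseek07/comments_youtube | text_cleaner.py | categorize_comment_sentiment
-- ===== SOURCE A (Python) =====
-- from typing import List, Dict
--
-- def categorize_comment_sentiment(detected_keywords: Dict[str, List[str]]) -> str:
--     """Categorize comment sentiment based on detected keywords."""
--     if any(keyword in detected_keywords for keyword in ['loved_it', 'great']):
--         return 'positive'
--     elif 'boring' in detected_keywords:
--         return 'negative'
--     elif any(keyword in detected_keywords for keyword in ['explanation', 'explain']):
--         return 'educational'
--     elif any(keyword in detected_keywords for keyword in ['physics_wallah', 'neetprep', 'neet']):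
--         return 'brand_mention'
--     else:
--         return 'neutral'
-- ===== SOURCE B (Python) =====
-- KEYWORD_CATEGORY = {
--     'loved_it': (0, 'positive'),
--     'great': (0, 'positive'),
--     'boring': (1, 'negative'),
--     'explanation': (2, 'educational'),
--     'explain': (2, 'educational'),
--     'physics_wallah': (3, 'brand_mention'),
--     'neetprep': (3, 'brand_mention'),
--     'neet': (3, 'brand_mention'),
-- }
--
-- def categorize_comment_sentiment(detected_keywords):
--     """Categorize comment sentiment: one pass over the detected keywords,
--     keeping the highest-priority (lowest-rank) sentiment seen."""
--     best_rank, best_category = 4, 'neutral'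
--     for key in detected_keywords:
--         entry = KEYWORD_CATEGORY.get(key)
--         if entry is not None and entry[0] < best_rank:
--             best_rank, best_category = entry
--     return best_category
-- ===== Notes on version B (the rewrite author's own statement) =====
-- stated objective: alternative
-- what changed: Inverted the traversal: instead of testing each rule group's keywords for membership in the dict (an if/elif cascade), B scans the dict's keys once and keeps the minimum-priority match via a keyword-to-(priority,category) map.
import Mathlib
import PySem

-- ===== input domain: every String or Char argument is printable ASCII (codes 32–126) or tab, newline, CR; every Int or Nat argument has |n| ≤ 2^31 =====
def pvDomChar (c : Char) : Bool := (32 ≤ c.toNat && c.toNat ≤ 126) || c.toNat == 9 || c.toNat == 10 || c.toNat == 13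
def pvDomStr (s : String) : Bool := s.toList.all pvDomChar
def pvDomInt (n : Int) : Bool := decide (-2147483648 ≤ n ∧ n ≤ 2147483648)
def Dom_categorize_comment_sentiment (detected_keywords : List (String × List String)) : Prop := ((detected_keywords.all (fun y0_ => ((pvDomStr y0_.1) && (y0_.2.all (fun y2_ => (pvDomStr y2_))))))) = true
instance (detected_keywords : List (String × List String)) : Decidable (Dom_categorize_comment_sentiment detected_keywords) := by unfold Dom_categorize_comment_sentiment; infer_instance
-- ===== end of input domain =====

-- B inverts the traversal: one pass over the dict's keys keeping the minimum-priority sentiment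
-- via a keyword→(priority,category) map, instead of A's if/elif membership cascade (alternative; same result).


-- ===== PORT A =====
-- 'keyword in dict' tests key membership
def pvHasKey (d : List (String × List String)) (k : String) : Bool :=
  d.any (fun p => p.1 == k)

def categorize_comment_sentiment (detected_keywords : List (String × List String)) : String :=
  if ["loved_it", "great"].any (fun keyword => pvHasKey detected_keywords keyword) then
    "positive"
  else if pvHasKey detected_keywords "boring" then
    "negative"
  else if ["explanation", "explain"].any (fun keyword => pvHasKey detected_keywords keyword) then
    "educational"
  else if ["physics_wallah", "neetprep", "neet"].any (fun keyword => pvHasKey detected_keywords keyword) then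
    "brand_mention"
  else
    "neutral"

-- ===== PORT B =====
def KEYWORD_CATEGORY : PySem.Dict String (Int × String) :=
  PySem.Dict.mk
    [("loved_it", (0, "positive")),
     ("great", (0, "positive")),
     ("boring", (1, "negative")),
     ("explanation", (2, "educational")),
     ("explain", (2, "educational")),
     ("physics_wallah", (3, "brand_mention")),
     ("neetprep", (3, "brand_mention")),
     ("neet", (3, "brand_mention"))]

-- the 'for key in detected_keywords' loop with accumulator (best_rank, best_category)
def pvBestLoop : List (String × List String) → Int × String → Int × String
  | [], best => best
  | (key, _) :: rest, best =>
    match KEYWORD_CATEGORY.get? key with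
    | some entry => if entry.1 < best.1 then pvBestLoop rest entry else pvBestLoop rest best
    | none => pvBestLoop rest best

def categorize_comment_sentiment_alt (detected_keywords : List (String × List String)) : String :=
  (pvBestLoop detected_keywords (4, "neutral")).2

-- ===== PRECONDITION & SPEC =====
def Spec_categorize_comment_sentiment (detected_keywords : List (String × List String)) (out : String) : Prop := out = categorize_comment_sentiment_alt detected_keywords
instance (detected_keywords : List (String × List String)) (out : String) : Decidable (Spec_categorize_comment_sentiment detected_keywords out) := by unfold Spec_categorize_comment_sentiment; infer_instance

-- ===== CLAIM (what is proved, stated in full; the proofs are below) =====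
def Claim_equal_categorize_comment_sentiment : Prop := ∀ (detected_keywords : List (String × List String)), Dom_categorize_comment_sentiment detected_keywords → Spec_categorize_comment_sentiment detected_keywords (categorize_comment_sentiment detected_keywords)

-- ===== LEMMAS AND PROOFS =====

-- rank of a key (4 if not a sentiment keyword)
def pvRank (k : String) : Int :=
  match KEYWORD_CATEGORY.get? k with
  | some e => e.1
  | none => 4

-- category of each rank
def pvCatOf (r : Int) : String :=
  if r = 0 then "positive" else if r = 1 then "negative" else if r = 2 then "educational"
  else if r = 3 then "brand_mention" else "neutral"

-- minimum rank over the dict's keys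
def pvMinRank : List (String × List String) → Int
  | [] => 4
  | (k, _) :: rest => min (pvRank k) (pvMinRank rest)

theorem pvGet_none (k : String)
    (h1 : k ≠ "loved_it") (h2 : k ≠ "great") (h3 : k ≠ "boring") (h4 : k ≠ "explanation")
    (h5 : k ≠ "explain") (h6 : k ≠ "physics_wallah") (h7 : k ≠ "neetprep") (h8 : k ≠ "neet") :
    KEYWORD_CATEGORY.get? k = none := by
  unfold KEYWORD_CATEGORY PySem.Dict.get?
  have : List.find? (fun p => p.1 == k)
      [("loved_it", ((0 : Int), "positive")), ("great", (0, "positive")), ("boring", (1, "negative")),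
       ("explanation", (2, "educational")), ("explain", (2, "educational")),
       ("physics_wallah", (3, "brand_mention")), ("neetprep", (3, "brand_mention")),
       ("neet", (3, "brand_mention"))] = none := by
    rw [List.find?_eq_none]
    intro x hx
    fin_cases hx <;> simp [Ne.symm h1, Ne.symm h2, Ne.symm h3, Ne.symm h4, Ne.symm h5,
      Ne.symm h6, Ne.symm h7, Ne.symm h8]
  simp [this]

theorem pvRank_spec (k : String) :
    (KEYWORD_CATEGORY.get? k = none ∧ pvRank k = 4) ∨
    (KEYWORD_CATEGORY.get? k = some (pvRank k, pvCatOf (pvRank k)) ∧ 0 ≤ pvRank k ∧ pvRank k < 4) := by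
  rcases eq_or_ne k "loved_it" with rfl | h1
  · right; decide
  rcases eq_or_ne k "great" with rfl | h2
  · right; decide
  rcases eq_or_ne k "boring" with rfl | h3
  · right; decide
  rcases eq_or_ne k "explanation" with rfl | h4
  · right; decide
  rcases eq_or_ne k "explain" with rfl | h5
  · right; decide
  rcases eq_or_ne k "physics_wallah" with rfl | h6
  · right; decide
  rcases eq_or_ne k "neetprep" with rfl | h7
  · right; decide
  rcases eq_or_ne k "neet" with rfl | h8
  · right; decide
  left
  have hg := pvGet_none k h1 h2 h3 h4 h5 h6 h7 h8
  exact ⟨hg, by unfold pvRank; rw [hg]⟩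

theorem pvRank_bounds (k : String) : 0 ≤ pvRank k ∧ pvRank k ≤ 4 := by
  rcases pvRank_spec k with ⟨_, h⟩ | ⟨_, h1, h2⟩ <;> omega

theorem pvMinRank_bounds (d : List (String × List String)) :
    0 ≤ pvMinRank d ∧ pvMinRank d ≤ 4 := by
  induction d with
  | nil => simp [pvMinRank]
  | cons p rest ih =>
    obtain ⟨k, v⟩ := p
    have := pvRank_bounds k
    simp only [pvMinRank]
    omega

theorem pvBestLoop_spec (d : List (String × List String)) :
    ∀ r : Int, 0 ≤ r → r ≤ 4 → pvBestLoop d (r, pvCatOf r) =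
      (min r (pvMinRank d), pvCatOf (min r (pvMinRank d))) := by
  induction d with
  | nil =>
    intro r _ hr2
    simp [pvBestLoop, pvMinRank, min_eq_left hr2]
  | cons p rest ih =>
    intro r hr1 hr2
    obtain ⟨k, v⟩ := p
    have hb := pvMinRank_bounds rest
    simp only [pvBestLoop, pvMinRank]
    rcases pvRank_spec k with ⟨hn, h4⟩ | ⟨hs, h0, h4⟩
    · rw [hn, ih r hr1 hr2, h4]
      have hm : min r (min (4 : Int) (pvMinRank rest)) = min r (pvMinRank rest) := by omega
      rw [hm]
    · rw [hs]
      dsimp only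
      by_cases hlt : pvRank k < r
      · rw [if_pos hlt, ih (pvRank k) h0 (by omega)]
        have hm : min r (min (pvRank k) (pvMinRank rest)) = min (pvRank k) (pvMinRank rest) := by
          omega
        rw [hm]
      · rw [if_neg hlt, ih r hr1 hr2]
        have hm : min r (min (pvRank k) (pvMinRank rest)) = min r (pvMinRank rest) := by omega
        rw [hm]

theorem pvRank_loved : pvRank "loved_it" = 0 := by decide
theorem pvRank_great : pvRank "great" = 0 := by decide
theorem pvRank_boring : pvRank "boring" = 1 := by decide
theorem pvRank_explanation : pvRank "explanation" = 2 := by decide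
theorem pvRank_explain : pvRank "explain" = 2 := by decide
theorem pvRank_pw : pvRank "physics_wallah" = 3 := by decide
theorem pvRank_neetprep : pvRank "neetprep" = 3 := by decide
theorem pvRank_neet : pvRank "neet" = 3 := by decide

-- one step of key membership
theorem pvHasKey_cons (k : String) (v : List String) (rest : List (String × List String)) (q : String) :
    pvHasKey ((k, v) :: rest) q = ((k == q) || pvHasKey rest q) := by
  simp [pvHasKey]

-- pvMinRank as the if/elif chain on key membership
theorem pvMinRank_chain (d : List (String × List String)) :
    pvMinRank d =
      if pvHasKey d "loved_it" || pvHasKey d "great" then 0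
      else if pvHasKey d "boring" then 1
      else if pvHasKey d "explanation" || pvHasKey d "explain" then 2
      else if pvHasKey d "physics_wallah" || (pvHasKey d "neetprep" || pvHasKey d "neet") then 3
      else 4 := by
  induction d with
  | nil => simp [pvMinRank, pvHasKey]
  | cons p rest ih =>
    obtain ⟨k, v⟩ := p
    have hb := pvMinRank_bounds rest
    simp only [pvMinRank, pvHasKey_cons]
    rw [ih]; clear ih
    rcases eq_or_ne k "loved_it" with rfl | h1
    · rw [pvRank_loved]
      simp only [show (("loved_it":String) == "loved_it") = true from rfl, show (("loved_it":String) == "great") = false from rfl, show (("loved_it":String) == "boring") = false from rfl, show (("loved_it":String) == "explanation") = false from rfl, show (("loved_it":String) == "explain") = false from rfl, show (("loved_it":String) == "physics_wallah") = false from rfl, show (("loved_it":String) == "neetprep") = false from rfl, show (("loved_it":String) == "neet") = false from rfl, Bool.false_or, Bool.true_or, Bool.or_true, if_true]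
      split_ifs <;> omega
    rcases eq_or_ne k "great" with rfl | h2
    · rw [pvRank_great]
      simp only [show (("great":String) == "loved_it") = false from rfl, show (("great":String) == "great") = true from rfl, show (("great":String) == "boring") = false from rfl, show (("great":String) == "explanation") = false from rfl, show (("great":String) == "explain") = false from rfl, show (("great":String) == "physics_wallah") = false from rfl, show (("great":String) == "neetprep") = false from rfl, show (("great":String) == "neet") = false from rfl, Bool.false_or, Bool.true_or, Bool.or_true, if_true]
      split_ifs <;> omega
    rcases eq_or_ne k "boring" with rfl | h3
    · rw [pvRank_boring]
      simp only [show (("boring":String) == "loved_it") = false from rfl, show (("boring":String) == "great") = false from rfl, show (("boring":String) == "boring") = true from rfl, show (("boring":String) == "explanation") = false from rfl, show (("boring":String) == "explain") = false from rfl, show (("boring":String) == "physics_wallah") = false from rfl, show (("boring":String) == "neetprep") = false from rfl, show (("boring":String) == "neet") = false from rfl, Bool.false_or, Bool.true_or, Bool.or_true, if_true]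
      split_ifs <;> omega
    rcases eq_or_ne k "explanation" with rfl | h4
    · rw [pvRank_explanation]
      simp only [show (("explanation":String) == "loved_it") = false from rfl, show (("explanation":String) == "great") = false from rfl, show (("explanation":String) == "boring") = false from rfl, show (("explanation":String) == "explanation") = true from rfl, show (("explanation":String) == "explain") = false from rfl, show (("explanation":String) == "physics_wallah") = false from rfl, show (("explanation":String) == "neetprep") = false from rfl, show (("explanation":String) == "neet") = false from rfl, Bool.false_or, Bool.true_or, Bool.or_true, if_true]
      split_ifs <;> omega
    rcases eq_or_ne k "explain" with rfl | h5
    · rw [pvRank_explain]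
      simp only [show (("explain":String) == "loved_it") = false from rfl, show (("explain":String) == "great") = false from rfl, show (("explain":String) == "boring") = false from rfl, show (("explain":String) == "explanation") = false from rfl, show (("explain":String) == "explain") = true from rfl, show (("explain":String) == "physics_wallah") = false from rfl, show (("explain":String) == "neetprep") = false from rfl, show (("explain":String) == "neet") = false from rfl, Bool.false_or, Bool.true_or, Bool.or_true, if_true]
      split_ifs <;> omega
    rcases eq_or_ne k "physics_wallah" with rfl | h6
    · rw [pvRank_pw]
      simp only [show (("physics_wallah":String) == "loved_it") = false from rfl, show (("physics_wallah":String) == "great") = false from rfl, show (("physics_wallah":String) == "boring") = false from rfl, show (("physics_wallah":String) == "explanation") = false from rfl, show (("physics_wallah":String) == "explain") = false from rfl, show (("physics_wallah":String) == "physics_wallah") = true from rfl, show (("physics_wallah":String) == "neetprep") = false from rfl, show (("physics_wallah":String) == "neet") = false from rfl, Bool.false_or, Bool.true_or, Bool.or_true, if_true]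
      split_ifs <;> omega
    rcases eq_or_ne k "neetprep" with rfl | h7
    · rw [pvRank_neetprep]
      simp only [show (("neetprep":String) == "loved_it") = false from rfl, show (("neetprep":String) == "great") = false from rfl, show (("neetprep":String) == "boring") = false from rfl, show (("neetprep":String) == "explanation") = false from rfl, show (("neetprep":String) == "explain") = false from rfl, show (("neetprep":String) == "physics_wallah") = false from rfl, show (("neetprep":String) == "neetprep") = true from rfl, show (("neetprep":String) == "neet") = false from rfl, Bool.false_or, Bool.true_or, Bool.or_true, if_true]
      split_ifs <;> omega
    rcases eq_or_ne k "neet" with rfl | h8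
    · rw [pvRank_neet]
      simp only [show (("neet":String) == "loved_it") = false from rfl, show (("neet":String) == "great") = false from rfl, show (("neet":String) == "boring") = false from rfl, show (("neet":String) == "explanation") = false from rfl, show (("neet":String) == "explain") = false from rfl, show (("neet":String) == "physics_wallah") = false from rfl, show (("neet":String) == "neetprep") = false from rfl, show (("neet":String) == "neet") = true from rfl, Bool.false_or, Bool.true_or, Bool.or_true, if_true]
      split_ifs <;> omega
    have h4' : pvRank k = 4 := by
      unfold pvRank; rw [pvGet_none k h1 h2 h3 h4 h5 h6 h7 h8]
    rw [h4']
    have hf : ∀ q : String, k ≠ q → (k == q) = false := fun q hq => beq_eq_false_iff_ne.mpr hq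
    simp only [hf _ h1, hf _ h2, hf _ h3, hf _ h4, hf _ h5, hf _ h6, hf _ h7, hf _ h8,
      Bool.false_or]
    split_ifs <;> omega

-- ===== VERDICT (by name: the statement is the Claim_ definition above) =====
theorem categorize_comment_sentiment_spec : Claim_equal_categorize_comment_sentiment := by
  intro d _
  unfold Spec_categorize_comment_sentiment categorize_comment_sentiment categorize_comment_sentiment_alt
  have hcat : pvCatOf 4 = "neutral" := by decide
  rw [← hcat, pvBestLoop_spec d 4 (by omega) (by omega)]
  have hch := pvMinRank_chain d
  simp only [List.any_cons, List.any_nil, Bool.or_false]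
  have hm : min (4:Int) (pvMinRank d) = pvMinRank d := by
    have := pvMinRank_bounds d; omega
  rw [hm]
  split_ifs at hch ⊢ <;> rw [hch] <;> decide
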